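-- pv_equiv track=rewrite | github.com/fteufel/DeepPeptide | evaluation/measure_performance.py | convert_path_to_peptide_borders
-- ===== SOURCE A (Python) =====
-- from typing import List, Tuple
--
-- def convert_path_to_peptide_borders(pred: List[int], start_state, stop_state, offset: int=0) -> List[Tuple[int,int]]:
--     '''Given a sequence of states, find the borders of contiguous peptide segments.
--        Offset adds a constant to all coordinates (1-based indexing in uniprot)
--     '''
--
--     seq_peptides = []
--     is_peptide = False
--
--     for pos, p in enumerate(pred):
--
--         if p == start_state and not is_peptide: # open a new peptide
--             is_peptide = True
--             peptide_start = pos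
--
--         # Close the peptide at the position that has the stop state. (can restart peptide immediately without NO-peptide gap.)
--         elif p == stop_state and is_peptide: #close the peptide
--             is_peptide = False
--             seq_peptides.append((peptide_start +offset, pos +offset))
--         else:
--             pass # for positions that are not start_state or stop_state, do nothing.
--
--     # close the last peptide if same as sequence end.
--     if is_peptide:
--         seq_peptides.append((peptide_start +offset,pos +offset))
--
--     return seq_peptides
-- ===== SOURCE B (Python) =====
-- from typing import List, Tuple
--
-- def convert_path_to_peptide_borders(pred: List[int], start_state, stop_state, offset: int=0) -> List[Tuple[int,int]]:
--     '''Nested-scan decomposition: locate the next start_state, then scan forward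
--        for its matching stop_state; flush a trailing open peptide at the end.'''
--     res = []
--     n = len(pred)
--     i = 0
--     while i < n:
--         if pred[i] == start_state:
--             j = i + 1
--             while j < n and pred[j] != stop_state:
--                 j += 1
--             if j < n:
--                 res.append((i + offset, j + offset))
--                 i = j + 1
--             else:
--                 res.append((i + offset, n - 1 + offset))
--                 break
--         else:
--             i += 1
--     return res
-- ===== Notes on version B (the rewrite author's own statement) =====
-- stated objective: alternative
-- what changed: Replaced A's single flag-carrying toggle pass with a nested-scan decomposition: an outer loop locates the next start_state and an inner loop finds its matching stop_state (or flushes a trailing open peptide), resuming after the close position.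
import Mathlib
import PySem

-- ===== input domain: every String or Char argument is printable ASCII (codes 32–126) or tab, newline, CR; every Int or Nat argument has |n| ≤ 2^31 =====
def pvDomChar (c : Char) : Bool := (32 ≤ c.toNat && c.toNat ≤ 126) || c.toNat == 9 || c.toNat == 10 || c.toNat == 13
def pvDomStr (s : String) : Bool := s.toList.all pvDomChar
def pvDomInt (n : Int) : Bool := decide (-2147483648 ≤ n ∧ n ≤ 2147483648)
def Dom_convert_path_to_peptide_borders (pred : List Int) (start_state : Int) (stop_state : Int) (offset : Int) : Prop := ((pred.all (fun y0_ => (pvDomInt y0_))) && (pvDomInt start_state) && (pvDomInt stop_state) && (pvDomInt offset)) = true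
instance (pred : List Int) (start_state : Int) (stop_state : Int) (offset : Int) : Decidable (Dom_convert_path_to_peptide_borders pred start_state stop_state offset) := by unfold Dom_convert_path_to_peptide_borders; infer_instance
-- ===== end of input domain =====

-- B replaces A's single toggle pass by a locate-start / locate-stop nested scan (alternative decomposition, same cost).

-- ===== PORT A =====
-- state: (seq_peptides, is_peptide, peptide_start); after the loop Python's `pos` is pred.length - 1.
def convert_path_to_peptide_borders (pred : List Int) (start_state : Int) (stop_state : Int) (offset : Int) : List (Int × Int) :=
  let st := (PySem.List.enumerate pred).foldl
    (fun (s : List (Int × Int) × Bool × Int) (pp : Int × Int) =>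
      if pp.2 = start_state ∧ ¬ s.2.1 then (s.1, true, pp.1)
      else if pp.2 = stop_state ∧ s.2.1 then (s.1 ++ [(s.2.2 + offset, pp.1 + offset)], false, s.2.2)
      else s)
    ([], false, 0)
  if st.2.1 then st.1 ++ [(st.2.2 + offset, ((pred.length : Int) - 1) + offset)] else st.1

-- ===== PORT B =====
-- inner while loop of Source B: scan l for the first stop_state; some (index, remainder after it) or none
def pvFindStop (stop_state : Int) (l : List Int) (j : Int) : Option (Int × List Int) :=
  match l with
  | [] => none
  | q :: rest => if q = stop_state then some (j, rest) else pvFindStop stop_state rest (j + 1)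

theorem pvFindStop_length {stop_state : Int} : ∀ (l : List Int) (j j' : Int) (r : List Int),
    pvFindStop stop_state l j = some (j', r) → r.length < l.length := by
  intro l
  induction l with
  | nil => intro j j' r h; simp [pvFindStop] at h
  | cons q rest ih =>
    intro j j' r h
    simp only [pvFindStop] at h
    split at h
    · simp at h; simp [h.2]
    · exact Nat.lt_succ_of_lt (ih (j + 1) j' r h)

-- outer while loop of Source B over the remaining suffix l (current index i, `last` = n - 1)
def pvScan (start_state stop_state offset last : Int) (l : List Int) (i : Int) : List (Int × Int) :=
  match h : l with
  | [] => []
  | p :: rest =>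
    if p = start_state then
      match hf : pvFindStop stop_state rest (i + 1) with
      | some (j, rest') => (i + offset, j + offset) :: pvScan start_state stop_state offset last rest' (j + 1)
      | none => [(i + offset, last + offset)]
    else pvScan start_state stop_state offset last rest (i + 1)
termination_by l.length
decreasing_by
  · exact Nat.lt_succ_of_lt (pvFindStop_length rest (i + 1) j rest' hf)
  · simp

def convert_path_to_peptide_borders_alt (pred : List Int) (start_state : Int) (stop_state : Int) (offset : Int) : List (Int × Int) :=
  pvScan start_state stop_state offset ((pred.length : Int) - 1) pred 0

-- ===== PRECONDITION & SPEC =====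
def Spec_convert_path_to_peptide_borders (pred : List Int) (start_state : Int) (stop_state : Int) (offset : Int) (out : List (Int × Int)) : Prop := out = convert_path_to_peptide_borders_alt pred start_state stop_state offset
instance (pred : List Int) (start_state : Int) (stop_state : Int) (offset : Int) (out : List (Int × Int)) : Decidable (Spec_convert_path_to_peptide_borders pred start_state stop_state offset out) := by unfold Spec_convert_path_to_peptide_borders; infer_instance

-- ===== CLAIM (what is proved, stated in full; the proofs are below) =====
def Claim_equal_convert_path_to_peptide_borders : Prop := ∀ (pred : List Int) (start_state : Int) (stop_state : Int) (offset : Int), Dom_convert_path_to_peptide_borders pred start_state stop_state offset → Spec_convert_path_to_peptide_borders pred start_state stop_state offset (convert_path_to_peptide_borders pred start_state stop_state offset)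

-- ===== LEMMAS AND PROOFS =====

-- A's loop body, abstracted for the proof
def pvStepA (start_state stop_state offset : Int) (s : List (Int × Int) × Bool × Int) (pp : Int × Int) : List (Int × Int) × Bool × Int :=
  if pp.2 = start_state ∧ ¬ s.2.1 then (s.1, true, pp.1)
  else if pp.2 = stop_state ∧ s.2.1 then (s.1 ++ [(s.2.2 + offset, pp.1 + offset)], false, s.2.2)
  else s

-- A's epilogue: flush the open peptide at `last`
def pvFin (offset last : Int) (s : List (Int × Int) × Bool × Int) : List (Int × Int) :=
  if s.2.1 then s.1 ++ [(s.2.2 + offset, last + offset)] else s.1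

-- B's open-peptide continuation, as a function of the remaining suffix
def pvOpen (start_state stop_state offset last : Int) (l : List Int) (j ps : Int) : List (Int × Int) :=
  match pvFindStop stop_state l j with
  | some (j', rest') => (ps + offset, j' + offset) :: pvScan start_state stop_state offset last rest' (j' + 1)
  | none => [(ps + offset, last + offset)]

theorem pvMain (start_state stop_state offset last : Int) :
    ∀ (n : Nat) (l : List Int), l.length ≤ n → ∀ (k : Int) (acc : List (Int × Int)) (isp : Bool) (ps : Int),
    pvFin offset last ((PySem.List.enumerate l k).foldl (pvStepA start_state stop_state offset) (acc, isp, ps))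
      = acc ++ (if isp then pvOpen start_state stop_state offset last l k ps
                else pvScan start_state stop_state offset last l k) := by
  intro n
  induction n with
  | zero =>
    intro l hl k acc isp ps
    have : l = [] := List.eq_nil_of_length_eq_zero (Nat.le_zero.mp hl)
    subst this
    cases isp <;> simp [PySem.List.enumerate_nil, pvFin, pvOpen, pvScan, pvFindStop]
  | succ n ih =>
    intro l hl k acc isp ps
    cases l with
    | nil => cases isp <;> simp [PySem.List.enumerate_nil, pvFin, pvOpen, pvScan, pvFindStop]
    | cons p rest =>
      have hr : rest.length ≤ n := Nat.le_of_succ_le_succ hl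
      rw [PySem.List.enumerate_cons, List.foldl_cons]
      cases isp with
      | false =>
        by_cases hs : p = start_state
        · have hstep : pvStepA start_state stop_state offset (acc, false, ps) (k, p) = (acc, true, k) := by
            simp [pvStepA, hs]
          rw [hstep, ih rest hr (k + 1) acc true k]
          simp only [if_true, pvOpen]
          rw [pvScan]
          simp [hs]
          cases pvFindStop stop_state rest (k + 1) <;> rfl
        · have hstep : pvStepA start_state stop_state offset (acc, false, ps) (k, p) = (acc, false, ps) := by
            simp [pvStepA, hs]
          rw [hstep, ih rest hr (k + 1) acc false ps]
          simp [pvScan, hs]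
      | true =>
        by_cases ht : p = stop_state
        · have hstep : pvStepA start_state stop_state offset (acc, true, ps) (k, p)
              = (acc ++ [(ps + offset, k + offset)], false, ps) := by
            simp [pvStepA, ht]
          rw [hstep, ih rest hr (k + 1) (acc ++ [(ps + offset, k + offset)]) false ps]
          simp [pvOpen, pvFindStop, ht]
        · have hstep : pvStepA start_state stop_state offset (acc, true, ps) (k, p) = (acc, true, ps) := by
            simp [pvStepA, ht]
          rw [hstep, ih rest hr (k + 1) acc true ps]
          simp [pvOpen, pvFindStop, ht]

theorem portA_eq (pred : List Int) (start_state stop_state offset : Int) :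
    convert_path_to_peptide_borders pred start_state stop_state offset
      = pvFin offset ((pred.length : Int) - 1)
          ((PySem.List.enumerate pred).foldl (pvStepA start_state stop_state offset) ([], false, 0)) := by
  rfl

-- ===== VERDICT (by name: the statement is the Claim_ definition above) =====
theorem convert_path_to_peptide_borders_spec : Claim_equal_convert_path_to_peptide_borders := by
  intro pred start_state stop_state offset _
  unfold Spec_convert_path_to_peptide_borders convert_path_to_peptide_borders_alt
  rw [portA_eq]
  have := pvMain start_state stop_state offset ((pred.length : Int) - 1) pred.length pred le_rfl 0 [] false 0
  simpa using this
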